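-- pv_equiv track=rewrite | github.com/SPIN-UMass/BLANKET | trainer/deepcorr.py | generate_perturbation
-- ===== SOURCE A (Python) =====
-- def generate_perturbation(change_points, size = 300):
--     start = size-len(change_points)
--     pert = []
--     passed = 0
--     for ind in range(size):
--         if ind in change_points:
--             pert.append(start)
--             start +=1
--             passed+=1
--         else:
--             pert.append(ind-passed)
--
--     return pert
-- ===== SOURCE B (Python) =====
-- def generate_perturbation(change_points, size=300):
--     # sort-then-fill-segments: mark the in-range change points once, sort them,
--     # and emit whole gap segments of consecutive low values between markers.
--     base = size - len(change_points)
--     matched = sorted({c for c in change_points if 0 <= c < size})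
--     pert = []
--     low = 0
--     prev = -1
--     for rank, c in enumerate(matched):
--         gap = c - prev - 1
--         pert.extend(range(low, low + gap))
--         low += gap
--         pert.append(base + rank)
--         prev = c
--     pert.extend(range(low, low + (size - prev - 1)))
--     return pert
-- ===== Notes on version B (the rewrite author's own statement) =====
-- stated objective: faster
-- what changed: Replaces A's per-index list-membership test over range(size) by a sort-then-fill pass: dedup+sort the in-range change points once, then emit whole gap segments of consecutive low values between successive markers.
import Mathlib
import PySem

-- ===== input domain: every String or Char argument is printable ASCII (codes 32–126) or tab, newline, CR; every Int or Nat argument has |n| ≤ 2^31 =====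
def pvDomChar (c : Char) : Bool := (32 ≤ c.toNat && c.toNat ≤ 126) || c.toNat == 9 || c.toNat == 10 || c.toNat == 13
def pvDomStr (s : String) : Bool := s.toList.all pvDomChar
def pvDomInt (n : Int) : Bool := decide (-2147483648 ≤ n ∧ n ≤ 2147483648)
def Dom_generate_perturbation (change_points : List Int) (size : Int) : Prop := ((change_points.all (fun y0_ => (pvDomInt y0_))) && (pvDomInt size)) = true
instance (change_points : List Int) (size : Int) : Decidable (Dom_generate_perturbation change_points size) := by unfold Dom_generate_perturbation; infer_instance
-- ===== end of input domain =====

-- B replaces A's per-index membership scan by sort-the-markers-then-fill-segments (alternative decomposition).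

-- ===== PORT A =====
def generate_perturbation (change_points : List Int) (size : Int) : List Int :=
  ((PySem.List.pyRange 0 size 1).foldl
    (fun (st : List Int × Int × Int) ind =>
      if ind ∈ change_points then (st.1 ++ [st.2.1], st.2.1 + 1, st.2.2 + 1)
      else (st.1 ++ [ind - st.2.2], st.2.1, st.2.2))
    ([], size - (change_points.length : Int), 0)).1

-- ===== PORT B =====
def generate_perturbation_alt (change_points : List Int) (size : Int) : List Int :=
  let base := size - (change_points.length : Int)
  let matched := PySem.List.sorted
    ((PySem.Set.ofList change_points).filter (fun c => decide (0 ≤ c ∧ c < size)))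
    (fun x => x) false
  let st := (PySem.List.enumerate matched 0).foldl
    (fun (st : List Int × Int × Int) rc =>
      (st.1 ++ PySem.List.pyRange st.2.1 (st.2.1 + (rc.2 - st.2.2 - 1)) 1 ++ [base + rc.1],
       st.2.1 + (rc.2 - st.2.2 - 1), rc.2))
    ([], 0, -1)
  st.1 ++ PySem.List.pyRange st.2.1 (st.2.1 + (size - st.2.2 - 1)) 1

-- ===== PRECONDITION & SPEC =====
def Spec_generate_perturbation (change_points : List Int) (size : Int) (out : List Int) : Prop := out = generate_perturbation_alt change_points size
instance (change_points : List Int) (size : Int) (out : List Int) : Decidable (Spec_generate_perturbation change_points size out) := by unfold Spec_generate_perturbation; infer_instance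

-- ===== CLAIM (what is proved, stated in full; the proofs are below) =====
def Claim_equal_generate_perturbation : Prop := ∀ (change_points : List Int) (size : Int), Dom_generate_perturbation change_points size → Spec_generate_perturbation change_points size (generate_perturbation change_points size)

-- ===== LEMMAS AND PROOFS =====

-- Reference: one value per index, carrying the high counter and the passed count.
def refA (cps : List Int) : List Int → Int → Int → List Int
  | [], _, _ => []
  | i :: rest, high, passed =>
    if i ∈ cps then high :: refA cps rest (high + 1) (passed + 1)
    else (i - passed) :: refA cps rest high passed

theorem foldA_eq (cps : List Int) :
    ∀ (inds pert : List Int) (high passed : Int),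
      ((inds.foldl
        (fun (st : List Int × Int × Int) ind =>
          if ind ∈ cps then (st.1 ++ [st.2.1], st.2.1 + 1, st.2.2 + 1)
          else (st.1 ++ [ind - st.2.2], st.2.1, st.2.2))
        (pert, high, passed))).1 = pert ++ refA cps inds high passed := by
  intro inds
  induction inds with
  | nil => intro pert high passed; simp [refA]
  | cons i rest ih =>
    intro pert high passed
    by_cases h : i ∈ cps <;> simp [refA, h, List.foldl_cons, ih]

theorem refA_no_match (cps : List Int) :
    ∀ (xs : List Int) (high passed : Int), (∀ i ∈ xs, i ∉ cps) →
      refA cps xs high passed = xs.map (fun i => i - passed) := by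
  intro xs
  induction xs with
  | nil => intro high passed _; simp [refA]
  | cons i rest ih =>
    intro high passed h
    have hi : i ∉ cps := h i (by simp)
    simp [refA, hi, ih _ _ (fun j hj => h j (by simp [hj]))]

theorem refA_append_no_match (cps : List Int) :
    ∀ (xs ys : List Int) (high passed : Int), (∀ i ∈ xs, i ∉ cps) →
      refA cps (xs ++ ys) high passed
        = xs.map (fun i => i - passed) ++ refA cps ys high passed := by
  intro xs
  induction xs with
  | nil => intro ys high passed _; simp
  | cons i rest ih =>
    intro ys high passed h
    have hi : i ∉ cps := h i (by simp)
    simp [refA, hi, ih _ _ _ (fun j hj => h j (by simp [hj]))]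

theorem map_sub_pyRange (a b passed : Int) :
    (PySem.List.pyRange a b 1).map (fun i => i - passed)
      = PySem.List.pyRange (a - passed) (b - passed) 1 := by
  rw [PySem.List.pyRange_one, PySem.List.pyRange_one]
  have : b - passed - (a - passed) = b - a := by ring
  rw [this, List.map_map]
  refine List.map_congr_left ?_
  intro k _
  simp; ring

-- 'filter of a consecutive range equals c :: m'' decomposed.
theorem filter_pyRange_cons (p : Int → Bool) :
    ∀ (n : Nat) (a e c : Int) (m' : List Int), (e - a).toNat = n →
      (PySem.List.pyRange a e 1).filter p = c :: m' →
      a ≤ c ∧ c < e ∧ p c = true ∧ (∀ i, a ≤ i → i < c → p i = false) ∧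
        m' = (PySem.List.pyRange (c + 1) e 1).filter p := by
  intro n
  induction n with
  | zero =>
    intro a e c m' hn h
    have he : e ≤ a := by omega
    rw [PySem.List.pyRange_one_eq_nil he] at h
    simp at h
  | succ n ih =>
    intro a e c m' hn h
    have hae : a < e := by omega
    rw [PySem.List.pyRange_one_cons hae] at h
    by_cases hpa : p a = true
    · simp [hpa] at h
      obtain ⟨hc, hm⟩ := h
      subst hc
      exact ⟨le_refl a, hae, hpa, fun i h1 h2 => absurd (lt_of_le_of_lt h1 h2) (lt_irrefl a), hm.symm⟩
    · simp only [List.filter_cons, hpa, if_false, Bool.false_eq_true] at h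
      obtain ⟨h1, h2, h3, h4, h5⟩ := ih (a + 1) e c m' (by omega) h
      refine ⟨by omega, h2, h3, ?_, h5⟩
      intro i hi1 hi2
      rcases eq_or_lt_of_le hi1 with rfl | hlt
      · simpa using hpa
      · exact h4 i (by omega) hi2

-- sorted in-range distinct change points = ascending in-range indices that are change points
theorem matched_eq (cps : List Int) (size : Int) :
    PySem.List.sorted
        ((PySem.Set.ofList cps).filter (fun c => decide (0 ≤ c ∧ c < size)))
        (fun x => x) false
      = (PySem.List.pyRange 0 size 1).filter (fun c => decide (c ∈ cps)) := by
  apply PySem.List.sorted_eq_of_perm_of_pairwise_lt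
  · rw [List.perm_ext_iff_of_nodup
      (List.Nodup.filter _ (PySem.List.nodup_pyRange_one 0 size))
      (List.Nodup.filter _ (PySem.Set.nodup_ofList cps))]
    intro x
    simp [List.mem_filter, PySem.List.mem_pyRange_one, PySem.Set.mem_ofList]
    tauto
  · exact List.Pairwise.filter _ (PySem.List.pairwise_lt_pyRange_one 0 size)

theorem B_main (cps : List Int) (base e : Int) :
    ∀ (m : List Int) (s prev low : Int) (pert : List Int),
      m = (PySem.List.pyRange (prev + 1) e 1).filter (fun c => decide (c ∈ cps)) →
      low = prev + 1 - s →
      (let st := (PySem.List.enumerate m s).foldl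
        (fun (st : List Int × Int × Int) rc =>
          (st.1 ++ PySem.List.pyRange st.2.1 (st.2.1 + (rc.2 - st.2.2 - 1)) 1 ++ [base + rc.1],
           st.2.1 + (rc.2 - st.2.2 - 1), rc.2))
        (pert, low, prev)
       st.1 ++ PySem.List.pyRange st.2.1 (st.2.1 + (e - st.2.2 - 1)) 1)
      = pert ++ refA cps (PySem.List.pyRange (prev + 1) e 1) (base + s) s := by
  intro m
  induction m with
  | nil =>
    intro s prev low pert hm hlow
    simp only [PySem.List.enumerate_nil, List.foldl_nil]
    have hnom : ∀ i ∈ PySem.List.pyRange (prev + 1) e 1, i ∉ cps := by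
      intro i hi hic
      have : i ∈ (PySem.List.pyRange (prev + 1) e 1).filter (fun c => decide (c ∈ cps)) := by
        simp [List.mem_filter, hi, hic]
      rw [← hm] at this; simp at this
    rw [refA_no_match cps _ _ _ hnom, map_sub_pyRange]
    have h1 : prev + 1 - s = low := hlow.symm
    have h2 : e - s = low + (e - prev - 1) := by omega
    rw [h1, h2]
  | cons c m' ih =>
    intro s prev low pert hm hlow
    obtain ⟨h1, h2, h3, h4, h5⟩ :=
      filter_pyRange_cons (fun c => decide (c ∈ cps)) (e - (prev + 1)).toNat
        (prev + 1) e c m' rfl hm.symm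
    have hc : c ∈ cps := by simpa using h3
    -- split the index range at c and at c+1
    have hsplit : PySem.List.pyRange (prev + 1) e 1
        = PySem.List.pyRange (prev + 1) c 1 ++ (c :: PySem.List.pyRange (c + 1) e 1) := by
      rw [PySem.List.pyRange_one_append (prev + 1) c e h1 (le_of_lt h2),
          PySem.List.pyRange_one_cons h2]
    have hnom : ∀ i ∈ PySem.List.pyRange (prev + 1) c 1, i ∉ cps := by
      intro i hi hic
      rw [PySem.List.mem_pyRange_one] at hi
      have := h4 i hi.1 hi.2
      simp [hic] at this
    -- one fold step
    rw [PySem.List.enumerate_cons, List.foldl_cons]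
    have ihapp := ih (s + 1) c (low + (c - prev - 1))
      (pert ++ PySem.List.pyRange low (low + (c - prev - 1)) 1 ++ [base + s])
      h5 (by omega)
    simp only at ihapp ⊢
    rw [ihapp]
    rw [hsplit, refA_append_no_match cps _ _ _ _ hnom]
    simp only [refA, if_pos hc]
    rw [map_sub_pyRange]
    have hr1 : prev + 1 - s = low := by omega
    have hr2 : c - s = low + (c - prev - 1) := by omega
    rw [hr1, hr2]
    simp only [List.append_assoc, List.cons_append, List.nil_append]
    rw [show base + (s + 1) = base + s + 1 by ring]

-- ===== VERDICT (by name: the statement is the Claim_ definition above) =====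
theorem generate_perturbation_spec : Claim_equal_generate_perturbation := by
  intro cps size _
  unfold Spec_generate_perturbation generate_perturbation generate_perturbation_alt
  rw [foldA_eq cps (PySem.List.pyRange 0 size 1) [] (size - (cps.length : Int)) 0]
  simp only [matched_eq cps size]
  have := B_main cps (size - (cps.length : Int)) size
    ((PySem.List.pyRange 0 size 1).filter (fun c => decide (c ∈ cps)))
    0 (-1) 0 [] (by norm_num) (by norm_num)
  simp only at this ⊢
  rw [show (-1 : Int) + 1 = 0 by norm_num] at this
  rw [this]
  simp
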